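-- pv_equiv track=rewrite | github.com/alexandraback/datacollection | solutions_5636311922769920_1/Python/linacurious/D.py | solve
-- ===== SOURCE A (Python) =====
-- import math
-- import itertools
--
-- def calculate_tile_no(tile_list, k, power):
--     if power == 0:
--         return next(tile_list)
--     return (k**power)*(next(tile_list)-1) + calculate_tile_no(tile_list, k, power-1)
--
-- def solve(k, c, s):
--     s_todo = math.ceil(k/c)
--     if s_todo > s:
--         return 'IMPOSSIBLE'
--     tile_list = itertools.cycle(range(1,k+1))
--     result = list()
--     while s_todo != 0:
--         result.append(calculate_tile_no(tile_list, k, c-1))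
--         s_todo -= 1
--     return (' '.join(map(str, result)))
-- ===== SOURCE B (Python) =====
-- def solve(k, c, s):
--     n = -(-k // c)  # exact integer ceil(k/c)
--     if n > s:
--         return 'IMPOSSIBLE'
--     out = []
--     for i in range(n):
--         base = i * c
--         total = 0
--         for j in range(c):
--             d = (base + j) % k + 1
--             total = total * k + (d - 1 if j < c - 1 else d)
--         out.append(total)
--     return ' '.join(map(str, out))
-- ===== Notes on version B (the rewrite author's own statement) =====
-- stated objective: alternative
-- what changed: Replaces the shared stateful itertools.cycle iterator and the recursive MSB-first power-sum helper (which recomputes k**power for every digit) by direct index arithmetic (the j-th digit of the i-th number is (i*c+j)%k+1) combined with an iterative Horner accumulation, and replaces float math.ceil(k/c) by exact integer ceiling division -(-k//c).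
import Mathlib
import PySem

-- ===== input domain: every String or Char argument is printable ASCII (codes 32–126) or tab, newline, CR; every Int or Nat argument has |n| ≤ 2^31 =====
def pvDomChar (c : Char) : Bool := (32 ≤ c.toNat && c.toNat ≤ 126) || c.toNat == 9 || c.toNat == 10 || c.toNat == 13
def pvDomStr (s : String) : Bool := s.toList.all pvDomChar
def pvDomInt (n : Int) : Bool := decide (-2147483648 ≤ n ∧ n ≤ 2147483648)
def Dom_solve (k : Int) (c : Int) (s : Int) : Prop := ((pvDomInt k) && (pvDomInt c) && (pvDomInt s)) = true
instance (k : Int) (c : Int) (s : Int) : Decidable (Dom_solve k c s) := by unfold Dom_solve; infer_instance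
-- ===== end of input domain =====

-- B replaces A's stateful cycle iterator + recursive power-sum by direct index
-- arithmetic with a Horner accumulation (objective: alternative, same cost).

-- ===== PORT A =====
-- itertools.cycle(range(1,k+1)) is modeled as the saved list plus a Nat position;
-- next() yields lst[pos % len(lst)] and advances pos.  (next() on an empty cycle
-- raises StopIteration in Python; that is only reachable outside Pre_solve,
-- where the getD default is returned instead.)
def cycleNext (lst : List Int) (pos : Nat) : Int × Nat :=
  (lst.getD (pos % lst.length) 0, pos + 1)

-- calculate_tile_no; for power < 0 Python recurses without bound (outside
-- Pre_solve) — the 'power < 0' branch only makes the port total there.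
def calcTile (lst : List Int) (k : Int) (power : Int) (pos : Nat) : Int × Nat :=
  if power = 0 then cycleNext lst pos
  else if power < 0 then (0, pos)
  else
    let dp := cycleNext lst pos
    let rest := calcTile lst k (power - 1) dp.2
    (k ^ power.toNat * (dp.1 - 1) + rest.1, rest.2)
  termination_by power.toNat
  decreasing_by omega

-- 'while s_todo != 0: result.append(...)' — Python diverges for negative s_todo
-- (outside Pre_solve); the fuel is s_todo.toNat.
def solveWhile (lst : List Int) (k : Int) (c : Int) : Nat → Nat → List Int → List Int
  | 0, _, acc => acc
  | f + 1, pos, acc =>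
    let vp := calcTile lst k (c - 1) pos
    solveWhile lst k c f vp.2 (acc ++ [vp.1])

def solve (k : Int) (c : Int) (s : Int) : String :=
  -- math.ceil(k/c): exact as integer ceiling division for |k|,|c| ≤ 2^31 (float error < 1/c)
  let s_todo := -(PySem.Int.floordiv (-k) c)
  if s_todo > s then "IMPOSSIBLE"
  else
    let tile_list := PySem.List.pyRange 1 (k + 1) 1
    let result := solveWhile tile_list k c s_todo.toNat 0 []
    PySem.Str.join " " (result.map PySem.Int.toStr)

-- ===== PORT B =====
def solve_alt (k : Int) (c : Int) (s : Int) : String :=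
  let n := -(PySem.Int.floordiv (-k) c)
  if n > s then "IMPOSSIBLE"
  else
    let out := (PySem.List.pyRange 0 n 1).map (fun i =>
      let base := i * c
      (PySem.List.pyRange 0 c 1).foldl (fun total j =>
        let d := PySem.Int.mod (base + j) k + 1
        if j < c - 1 then total * k + (d - 1) else total * k + d) 0)
    PySem.Str.join " " (out.map PySem.Int.toStr)

-- ===== PRECONDITION & SPEC =====
-- Pre_solve excludes c = 0 (ZeroDivisionError in A) and the inputs where A does
-- not return: with k < 0 or c < 0, unless the IMPOSSIBLE guard fires (s < n) or
-- the loop is empty (n = 0), A's while loop or the recursion never terminates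
-- (or overflows the recursion stack).
def Pre_solve (k : Int) (c : Int) (s : Int) : Prop :=
  c ≠ 0 ∧ ((0 < c ∧ 0 ≤ k) ∨ s < -(PySem.Int.floordiv (-k) c) ∨ -(PySem.Int.floordiv (-k) c) = 0)
instance (k : Int) (c : Int) (s : Int) : Decidable (Pre_solve k c s) := by unfold Pre_solve; infer_instance
def pvWitness_solve : Int × Int × Int := (3, 2, 5)

def Spec_solve (k : Int) (c : Int) (s : Int) (out : String) : Prop := out = solve_alt k c s
instance (k : Int) (c : Int) (s : Int) (out : String) : Decidable (Spec_solve k c s out) := by unfold Spec_solve; infer_instance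

-- ===== CLAIM (what is proved, stated in full; the proofs are below) =====
def Claim_equal_solve : Prop := ∀ (k : Int) (c : Int) (s : Int), Dom_solve k c s → Pre_solve k c s → Spec_solve k c s (solve k c s)

-- ===== LEMMAS AND PROOFS =====

-- reference value of one emitted number: digits are positions q, q+1, … of the
-- infinite sequence (q % k)+1, combined MSB-first with powers of k (last digit raw)
def refTile (k : Int) : Nat → Nat → Int
  | q, 0 => 1 + ((q % k.toNat : Nat) : Int)
  | q, p + 1 => k ^ (p + 1) * ((1 + ((q % k.toNat : Nat) : Int)) - 1) + refTile k (q + 1) p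

theorem cycleNext_pyRange (k : Int) (hk : 0 < k) (pos : Nat) :
    cycleNext (PySem.List.pyRange 1 (k + 1) 1) pos
      = (1 + ((pos % k.toNat : Nat) : Int), pos + 1) := by
  have hlen : (PySem.List.pyRange 1 (k + 1) 1).length = k.toNat := by
    rw [PySem.List.length_pyRange_one]; omega
  have hm : pos % k.toNat < k.toNat := Nat.mod_lt _ (by omega)
  unfold cycleNext
  rw [hlen, List.getD_eq_getElem _ _ (by omega)]
  rw [PySem.List.getElem_pyRange_one]

theorem calcTile_eq_refTile (k : Int) (hk : 0 < k) (p : Nat) (pos : Nat) :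
    calcTile (PySem.List.pyRange 1 (k + 1) 1) k (p : Int) pos
      = (refTile k pos p, pos + p + 1) := by
  induction p generalizing pos with
  | zero =>
      rw [calcTile]
      simp [cycleNext_pyRange k hk, refTile]
  | succ p ih =>
      rw [calcTile]
      have h0 : ¬ ((p + 1 : Nat) : Int) = 0 := by omega
      have h1 : ¬ ((p + 1 : Nat) : Int) < 0 := by omega
      rw [if_neg h0, if_neg h1]
      have hcast : ((p + 1 : Nat) : Int) - 1 = (p : Int) := by omega
      simp only [cycleNext_pyRange k hk, hcast, ih]
      have ht : ((p + 1 : Nat) : Int).toNat = p + 1 := by omega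
      rw [ht]
      simp [refTile]
      omega

theorem mod_digit (k : Int) (hk : 0 < k) (x : Int) (hx : 0 ≤ x) :
    PySem.Int.mod x k = ((x.toNat % k.toNat : Nat) : Int) := by
  have h1 : x = ((x.toNat : Nat) : Int) := by omega
  have h2 : k = ((k.toNat : Nat) : Int) := by omega
  rw [h1, h2, PySem.Int.mod_natCast]
  simp

-- B's inner Horner fold over the tail range [j, c) equals A's reference value
theorem horner_eq_refTile (k : Int) (hk : 0 < k) (c : Int) (base : Int)
    (hbase : 0 ≤ base) (r : Nat) (hr : 0 < r) (j : Int) (hj : 0 ≤ j)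
    (hjr : c - j = (r : Int)) (t : Int) :
    (PySem.List.pyRange j c 1).foldl (fun total jj =>
        if jj < c - 1 then total * k + (PySem.Int.mod (base + jj) k + 1 - 1)
        else total * k + (PySem.Int.mod (base + jj) k + 1)) t
      = t * k ^ r + refTile k (base + j).toNat (r - 1) := by
  induction r generalizing j t with
  | zero => omega
  | succ r ih =>
      rw [PySem.List.pyRange_one_cons (by omega)]
      simp only [List.foldl_cons]
      have hd : PySem.Int.mod (base + j) k
          = (((base + j).toNat % k.toNat : Nat) : Int) :=
        mod_digit k hk _ (by omega)
      by_cases hr0 : r = 0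
      · subst hr0
        have hlast : ¬ (j < c - 1) := by omega
        rw [if_neg hlast, PySem.List.pyRange_one_eq_nil (by omega)]
        simp only [List.foldl_nil]
        rw [hd]
        simp [refTile]
        omega
      · have hlt : j < c - 1 := by omega
        rw [if_pos hlt]
        rw [ih (by omega) (j + 1) (by omega) (by omega)]
        have hsucc : (base + (j + 1)).toNat = (base + j).toNat + 1 := by omega
        rw [hsucc]
        have hrr : r - 1 + 1 = r := by omega
        have href : refTile k (base + j).toNat r
            = k ^ r * ((1 + (((base + j).toNat % k.toNat : Nat) : Int)) - 1)
              + refTile k ((base + j).toNat + 1) (r - 1) := by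
          conv_lhs => rw [← hrr]
          simp [refTile, hrr]
        have hn : (r : Nat) + 1 - 1 = r := rfl
        rw [hn, href, hd]
        ring

-- A's while loop produces the reference values at positions 0, c, 2c, …
theorem solveWhile_eq_map (k : Int) (hk : 0 < k) (c : Int) (hc : 0 < c)
    (f : Nat) (q : Nat) (acc : List Int) :
    solveWhile (PySem.List.pyRange 1 (k + 1) 1) k c f q acc
      = acc ++ (List.range f).map (fun i => refTile k (q + i * c.toNat) (c - 1).toNat) := by
  induction f generalizing q acc with
  | zero => simp [solveWhile]
  | succ f ih =>
      rw [solveWhile]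
      have hp : (c - 1) = (((c - 1).toNat : Nat) : Int) := by omega
      rw [hp, calcTile_eq_refTile k hk]
      rw [ih, List.range_succ_eq_map, List.map_cons, List.map_map, List.append_assoc,
        List.singleton_append]
      congr 1
      congr 1
      · norm_num
      · apply List.map_congr_left
        intro i _
        show refTile k (q + (c - 1).toNat + 1 + i * c.toNat) (c - 1).toNat
            = refTile k (q + (i + 1) * c.toNat) (c - 1).toNat
        congr 1
        rw [Nat.add_mul, one_mul]
        omega

theorem map_pyRange_zero_eq (g : Int → Int) (n : Int) :
    (PySem.List.pyRange 0 n 1).map g = (List.range n.toNat).map (fun i : Nat => g (0 + (i : Int))) := by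
  rw [PySem.List.pyRange_one, List.map_map]
  have h : (n - 0).toNat = n.toNat := by omega
  rw [h]
  rfl

theorem result_lists_eq (k c : Int) (hk : 0 ≤ k) (hc : 0 < c) :
    solveWhile (PySem.List.pyRange 1 (k + 1) 1) k c
        (-(PySem.Int.floordiv (-k) c)).toNat 0 []
      = (PySem.List.pyRange 0 (-(PySem.Int.floordiv (-k) c)) 1).map (fun i =>
          (PySem.List.pyRange 0 c 1).foldl (fun total j =>
            if j < c - 1 then total * k + (PySem.Int.mod (i * c + j) k + 1 - 1)
            else total * k + (PySem.Int.mod (i * c + j) k + 1)) 0) := by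
  set n := -(PySem.Int.floordiv (-k) c) with hn
  by_cases hk0 : k = 0
  · have : n = 0 := by
      rw [hn, hk0]
      simp [PySem.Int.floordiv_eq_ediv_of_pos hc]
    rw [this]
    simp [solveWhile, PySem.List.pyRange_one_eq_nil]
  · have hkpos : 0 < k := by omega
    rw [solveWhile_eq_map k hkpos c hc]
    rw [map_pyRange_zero_eq]
    simp only [List.nil_append]
    apply List.map_congr_left
    intro i hi
    have hin : i < n.toNat := List.mem_range.mp hi
    rw [horner_eq_refTile k hkpos c ((0 + (i : Int)) * c)
        (by positivity) c.toNat (by omega) 0 (by omega) (by omega) 0]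
    have hb : ((0 + (i : Int)) * c + 0).toNat = 0 + i * c.toNat := by
      have h1 : (0 + (i : Int)) * c + 0 = (i : Int) * c := by ring
      rw [h1]
      have h2 : ((i : Int) * c) = ((i * c.toNat : Nat) : Int) := by
        push_cast; rw [Int.toNat_of_nonneg (by omega)]
      omega
    rw [hb]
    have hct : c.toNat - 1 = (c - 1).toNat := by omega
    rw [hct]
    ring

-- ===== VERDICT (by name: the statement is the Claim_ definition above) =====
theorem solve_spec : Claim_equal_solve := by
  intro k c s _ hpre
  obtain ⟨hc0, hcase⟩ := hpre
  unfold Spec_solve solve solve_alt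
  dsimp only
  by_cases hgt : -(PySem.Int.floordiv (-k) c) > s
  · rw [if_pos hgt, if_pos hgt]
  · rw [if_neg hgt, if_neg hgt]
    rcases hcase with ⟨hc, hk⟩ | hlt | hzero
    · rw [result_lists_eq k c hk hc]
    · omega
    · rw [hzero]
      simp [solveWhile, PySem.List.pyRange_one_eq_nil]
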